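-- pv_equiv track=rewrite | github.com/trajnovd/RefrenceCheker | download_rules.py | _iter_rules
-- ===== SOURCE A (Python) =====
-- def _iter_rules(host, rules):
--     """Yield (matched_domain, rule) pairs in order of specificity (longest suffix first)."""
--     if not host:
--         return
--     host = host.lower()
--     matches = [d for d in rules if host == d or host.endswith("." + d)]
--     matches.sort(key=len, reverse=True)  # most specific first
--     for d in matches:
--         yield d, rules[d]
-- ===== SOURCE B (Python) =====
-- def _after_first_dot(s):
--     i = s.find(".")
--     return None if i == -1 else s[i + 1:]
--
-- def _iter_rules(host, rules):
--     """Yield (matched_domain, rule) pairs longest suffix first, by walking the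
--     host's dot-suffixes (already in decreasing length) and looking each up."""
--     if not host:
--         return
--     s = host.lower()
--     while s is not None:
--         if s in rules:
--             yield s, rules[s]
--         s = _after_first_dot(s)
-- ===== Notes on version B (the rewrite author's own statement) =====
-- stated objective: alternative
-- what changed: Instead of scanning every rule for a suffix match and then sorting the matches by length, B walks the lowered host's dot-suffixes (generated longest-first by construction) and looks each one up in the rules dict, so the per-host work depends on the number of host segments rather than on scanning and sorting the rule set.
import Mathlib
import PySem

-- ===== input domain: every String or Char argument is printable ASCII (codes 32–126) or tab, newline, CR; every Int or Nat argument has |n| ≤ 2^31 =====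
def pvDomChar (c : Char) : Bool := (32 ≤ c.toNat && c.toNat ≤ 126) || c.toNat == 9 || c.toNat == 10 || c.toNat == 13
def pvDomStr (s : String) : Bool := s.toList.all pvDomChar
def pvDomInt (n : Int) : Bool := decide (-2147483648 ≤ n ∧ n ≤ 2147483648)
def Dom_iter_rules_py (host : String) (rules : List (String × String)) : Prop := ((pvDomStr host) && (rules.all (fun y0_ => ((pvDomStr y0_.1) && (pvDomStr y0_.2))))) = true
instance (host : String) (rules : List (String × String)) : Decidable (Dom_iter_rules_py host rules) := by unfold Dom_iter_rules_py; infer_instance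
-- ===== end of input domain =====

-- B replaces A's filter-all-rules-then-sort with a walk over the host's dot-suffixes
-- (generated longest-first by construction), looking each suffix up in the rules dict,
-- so no scan over the rule set and no sort are needed (alternative algorithm).

-- ===== PORT A =====
-- list-of-pairs argument is a Python dict: materialise it as a PySem.Dict (insertion order,
-- last write wins), as dict construction does
def iter_rules_py (host : String) (rules : List (String × String)) : List (String × String) :=
  if host.toList = [] then []      -- "if not host: return"
  else
    let d := PySem.Dict.ofList rules
    let h := PySem.Str.lower host
    -- mtchs = [d for d in rules if host == d or host.endswith("." + d)]
    let mtchs := d.keys.filter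
      (fun k => h == k || PySem.Chars.endswith h.toList ('.' :: k.toList))
    -- mtchs.sort(key=len, reverse=True)
    let ms := PySem.List.sorted mtchs (fun k => PySem.Str.len k) true
    ms.map (fun k => (k, d.getD k ""))

-- ===== PORT B =====
-- _after_first_dot: s.find(".") then s[i+1:] ported as first-match tail (exact)
def pvAfterFirstDot : List Char → Option (List Char)
  | [] => none
  | c :: t => if c = '.' then some t else pvAfterFirstDot t

theorem pvAfterFirstDot_length : ∀ {cs t : List Char}, pvAfterFirstDot cs = some t → t.length < cs.length := by
  intro cs
  induction cs with
  | nil => intro t h; simp [pvAfterFirstDot] at h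
  | cons c r ih =>
    intro t h
    by_cases hc : c = '.'
    · simp [pvAfterFirstDot, hc] at h; subst h; simp
    · simp [pvAfterFirstDot, hc] at h
      exact Nat.lt_succ_of_lt (ih h)

-- the "while s is not None" loop of Source B
def pvAltLoop (d : PySem.Dict String String) (cs : List Char) : List (String × String) :=
  (if d.contains (String.ofList cs) then [(String.ofList cs, d.getD (String.ofList cs) "")] else []) ++
  (match h : pvAfterFirstDot cs with
   | none => []
   | some t => pvAltLoop d t)
termination_by cs.length
decreasing_by exact pvAfterFirstDot_length h

def iter_rules_py_alt (host : String) (rules : List (String × String)) : List (String × String) :=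
  if host.toList = [] then []
  else pvAltLoop (PySem.Dict.ofList rules) (PySem.Str.lower host).toList

-- ===== PRECONDITION & SPEC =====
def Spec_iter_rules_py (host : String) (rules : List (String × String)) (out : List (String × String)) : Prop := out = iter_rules_py_alt host rules
instance (host : String) (rules : List (String × String)) (out : List (String × String)) : Decidable (Spec_iter_rules_py host rules out) := by unfold Spec_iter_rules_py; infer_instance

-- ===== CLAIM (what is proved, stated in full; the proofs are below) =====
def Claim_equal_iter_rules_py : Prop := ∀ (host : String) (rules : List (String × String)), Dom_iter_rules_py host rules → Spec_iter_rules_py host rules (iter_rules_py host rules)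

-- ===== LEMMAS AND PROOFS =====

-- all tails of cs that follow a '.' (in left-to-right, i.e. decreasing-length, order)
def pvDotTails : List Char → List (List Char)
  | [] => []
  | c :: t => (if c = '.' then [t] else []) ++ pvDotTails t

-- the list of strings pvAltLoop visits: cs itself, then all dot-tails
def pvChain (cs : List Char) : List (List Char) := cs :: pvDotTails cs

theorem pvDotTails_step (cs : List Char) :
    (match pvAfterFirstDot cs with | none => ([] : List (List Char)) | some t => t :: pvDotTails t)
      = pvDotTails cs := by
  induction cs with
  | nil => simp [pvAfterFirstDot, pvDotTails]
  | cons c r ih =>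
    by_cases hc : c = '.'
    · simp [pvAfterFirstDot, pvDotTails, hc]
    · simp [pvAfterFirstDot, pvDotTails, hc, ih]

theorem mem_pvDotTails {s : List Char} : ∀ {cs : List Char}, s ∈ pvDotTails cs ↔ ('.' :: s) <:+ cs := by
  intro cs
  induction cs with
  | nil => simp [pvDotTails]
  | cons c r ih =>
    rw [List.suffix_cons_iff]
    by_cases hc : c = '.'
    · subst hc
      simp [pvDotTails, ih]
    · simp [pvDotTails, hc, ih]
      tauto

theorem length_lt_of_mem_pvDotTails {s cs : List Char} (h : s ∈ pvDotTails cs) :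
    s.length < cs.length := by
  have hsuf : ('.' :: s) <:+ cs := mem_pvDotTails.mp h
  have := hsuf.length_le
  simpa using this

theorem pvDotTails_pairwise : ∀ (cs : List Char),
    (pvDotTails cs).Pairwise (fun a b => b.length < a.length) := by
  intro cs
  induction cs with
  | nil => simp [pvDotTails]
  | cons c r ih =>
    by_cases hc : c = '.'
    · simp only [pvDotTails, hc, if_pos rfl, List.singleton_append]
      exact List.Pairwise.cons (fun b hb => length_lt_of_mem_pvDotTails hb) ih
    · simpa [pvDotTails, hc] using ih

theorem pvChain_pairwise (cs : List Char) :
    (pvChain cs).Pairwise (fun a b => b.length < a.length) :=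
  List.Pairwise.cons (fun b hb => length_lt_of_mem_pvDotTails hb) (pvDotTails_pairwise cs)

theorem pvChain_nodup (cs : List Char) : (pvChain cs).Nodup :=
  (pvChain_pairwise cs).imp (fun h => by intro he; subst he; omega)

theorem mem_pvChain {s cs : List Char} : s ∈ pvChain cs ↔ s = cs ∨ ('.' :: s) <:+ cs := by
  simp [pvChain, mem_pvDotTails]

-- pvAltLoop is: keep the members of pvChain that are keys, pair each with its value
theorem pvAltLoop_eq (d : PySem.Dict String String) : ∀ (cs : List Char),
    pvAltLoop d cs =
      ((pvChain cs).filter (fun s => d.contains (String.ofList s))).map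
        (fun s => (String.ofList s, d.getD (String.ofList s) "")) := by
  intro cs
  induction cs using pvAltLoop.induct with
  | _ cs ih =>
    rw [pvAltLoop]
    simp only [pvChain, List.filter_cons]
    rcases h : pvAfterFirstDot cs with _ | t
    · rw [← pvDotTails_step cs, h]
      by_cases hct : d.contains (String.ofList cs) <;> simp [hct]
    · rw [← pvDotTails_step cs, h]
      have hrec := ih t h
      by_cases hct : d.contains (String.ofList cs) <;>
        simp [hct, hrec, pvChain, List.filter_cons]

-- the Python match condition is exactly membership of the key's chars in pvChain
theorem match_iff (h : String) (k : String) :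
    (h == k || PySem.Chars.endswith h.toList ('.' :: k.toList)) = true ↔
      k.toList ∈ pvChain h.toList := by
  rw [mem_pvChain]
  simp only [Bool.or_eq_true, beq_iff_eq, PySem.Chars.endswith_iff]
  constructor
  · rintro (rfl | hs)
    · exact Or.inl rfl
    · exact Or.inr hs
  · rintro (he | hs)
    · refine Or.inl ?_
      have := congrArg String.ofList he
      simpa [String.ofList_toList] using this.symm
    · exact Or.inr hs

theorem string_mk_inj : Function.Injective String.ofList := by
  intro a b h
  have := congrArg String.toList h
  simpa using this

theorem iter_rules_py_spec_aux (host : String) (rules : List (String × String)) :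
    iter_rules_py host rules = iter_rules_py_alt host rules := by
  unfold iter_rules_py iter_rules_py_alt
  by_cases hh : host.toList = []
  · simp [hh]
  · rw [if_neg hh, if_neg hh]
    dsimp only
    set d := PySem.Dict.ofList rules with hd
    set h := PySem.Str.lower host with hhl
    set H := h.toList with hH
    rw [pvAltLoop_eq]
    set chainF := (pvChain H).filter (fun s => d.contains (String.ofList s)) with hcf
    have hsorted :
        PySem.List.sorted
          (d.keys.filter (fun k => h == k || PySem.Chars.endswith h.toList ('.' :: k.toList)))
          (fun k => PySem.Str.len k) true = chainF.map String.ofList := by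
      apply PySem.List.sorted_rev_eq_of_perm_of_pairwise_gt
      · -- permutation: both are Nodup with the same members
        rw [List.perm_ext_iff_of_nodup]
        · intro x
          simp only [List.mem_map, List.mem_filter, hcf]
          constructor
          · rintro ⟨s, ⟨hs, hc⟩, rfl⟩
            refine ⟨?_, ?_⟩
            · exact (PySem.Dict.contains_iff_mem_keys d (String.ofList s)).mp hc
            · rw [match_iff]
              simpa using hs
          · rintro ⟨hk, hm⟩
            refine ⟨x.toList, ⟨?_, ?_⟩, by apply String.ext; simp⟩
            · rw [match_iff] at hm; simpa using hm
            · have : String.ofList x.toList = x := by apply String.ext; simp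
              rw [this]
              exact (PySem.Dict.contains_iff_mem_keys d x).mpr hk
        · exact ((pvChain_nodup H).filter _).map string_mk_inj
        · exact (PySem.Dict.nodup_keys_ofList rules).filter _
      · -- strictly decreasing key (= length)
        rw [List.pairwise_map]
        have := (pvChain_pairwise H).filter (fun s => d.contains (String.ofList s))
        refine this.imp ?_
        intro a b hab
        simp only [PySem.Str.len_eq]
        have ha : (String.ofList a).toList = a := by simp
        have hb : (String.ofList b).toList = b := by simp
        rw [ha, hb]
        exact_mod_cast hab
    rw [hsorted, List.map_map]
    rfl

-- ===== VERDICT (by name: the statement is the Claim_ definition above) =====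
theorem iter_rules_py_spec : Claim_equal_iter_rules_py := by
  intro host rules _
  exact iter_rules_py_spec_aux host rules
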